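-- pv_equiv track=rewrite | github.com/wuzhaoqi1015/leetcode_code_python | Easy/2614.py | diagonalPrime
-- ===== SOURCE A (Python) =====
-- from typing import List
--
-- def diagonalPrime(nums: List[List[int]]) -> int:
--     # 判断是否为质数的辅助函数
--     def is_prime(x):
--         if x < 2:
--             return False
--         if x == 2:
--             return True
--         if x % 2 == 0:
--             return False
--         i = 3
--         while i * i <= x:
--             if x % i == 0:
--                 return False
--             i += 2
--         return True
--
--     n = len(nums)
--     max_prime = 0
--
--     # 遍历两条对角线
--     for i in range(n):
--         # 主对角线元素
--         val1 = nums[i][i]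
--         if val1 > max_prime and is_prime(val1):
--             max_prime = val1
--
--         # 副对角线元素
--         val2 = nums[i][n - i - 1]
--         if val2 > max_prime and is_prime(val2):
--             max_prime = val2
--
--     return max_prime
-- ===== SOURCE B (Python) =====
-- def diagonalPrime(nums):
--     def is_prime(x):
--         if x < 2:
--             return False
--         if x == 2:
--             return True
--         if x % 2 == 0:
--             return False
--         i = 3
--         while i * i <= x:
--             if x % i == 0:
--                 return False
--             i += 2
--         return True
--
--     n = len(nums)
--     vals = []
--     for i in range(n):
--         vals.append(nums[i][i])
--         vals.append(nums[i][n - i - 1])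
--     vals.sort(reverse=True)
--     for v in vals:
--         if is_prime(v):
--             return v
--     return 0
-- ===== Notes on version B (the rewrite author's own statement) =====
-- stated objective: alternative
-- what changed: B collects all diagonal values into one list, sorts it descending, and returns the first prime found in that order, replacing A's running-max scan that tests every diagonal value in place.
import Mathlib
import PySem

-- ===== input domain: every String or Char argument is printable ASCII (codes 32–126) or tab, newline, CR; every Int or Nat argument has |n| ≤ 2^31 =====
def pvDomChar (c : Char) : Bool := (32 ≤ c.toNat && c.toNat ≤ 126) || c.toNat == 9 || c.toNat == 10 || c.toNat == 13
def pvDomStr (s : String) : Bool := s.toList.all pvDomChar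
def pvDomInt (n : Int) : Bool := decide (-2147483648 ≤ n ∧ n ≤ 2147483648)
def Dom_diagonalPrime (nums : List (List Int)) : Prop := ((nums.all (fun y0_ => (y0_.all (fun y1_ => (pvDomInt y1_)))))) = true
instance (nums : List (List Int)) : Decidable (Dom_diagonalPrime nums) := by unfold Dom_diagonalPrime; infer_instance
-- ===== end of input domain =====

-- B collects the diagonal values into one list, sorts it descending and returns the first
-- prime in that order (0 if none), instead of A's running-max scan; same primality test.


-- ===== PORT A =====
-- trial-division loop: while i*i <= x: if x % i == 0: return False; i += 2
def primeLoop (x i : Int) : Bool :=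
  if h : i * i ≤ x then
    if PySem.Int.mod x i = 0 then false
    else primeLoop x (i + 2)
  else true
termination_by (x + 2 - i).toNat
decreasing_by
  have hi : i ≤ x := by
    rcases (by omega : i ≤ 0 ∨ 0 < i) with h0 | h0
    · exact le_trans (le_trans h0 (mul_self_nonneg i)) h
    · calc i = i * 1 := by ring
        _ ≤ i * i := by exact mul_le_mul_of_nonneg_left h0 (by omega)
        _ ≤ x := h
  omega

-- shared helper: both Pythons define the identical is_prime
def isPrime (x : Int) : Bool :=
  if x < 2 then false
  else if x = 2 then true
  else if PySem.Int.mod x 2 = 0 then false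
  else primeLoop x 3

def diagonalPrime (nums : List (List Int)) : Int :=
  let n : Int := nums.length
  (PySem.List.pyRange 0 n 1).foldl
    (fun max_prime i =>
      let val1 := PySem.List.pyGetD (PySem.List.pyGetD nums i []) i 0
      let max_prime := if max_prime < val1 ∧ isPrime val1 = true then val1 else max_prime
      let val2 := PySem.List.pyGetD (PySem.List.pyGetD nums i []) (n - i - 1) 0
      if max_prime < val2 ∧ isPrime val2 = true then val2 else max_prime) 0

-- ===== PORT B =====
def diagonalPrime_alt (nums : List (List Int)) : Int :=
  let n : Int := nums.length
  let vals := (PySem.List.pyRange 0 n 1).foldl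
    (fun vs i =>
      vs ++ [PySem.List.pyGetD (PySem.List.pyGetD nums i []) i 0,
             PySem.List.pyGetD (PySem.List.pyGetD nums i []) (n - i - 1) 0]) []
  let s := PySem.List.sorted vals (fun v => v) true
  match s.find? isPrime with
  | some v => v
  | none => 0

-- ===== PRECONDITION & SPEC =====
-- Pre_ excludes exactly the inputs where Python A raises IndexError: some row i is too
-- short for index i or for index n-1-i.
def Pre_diagonalPrime (nums : List (List Int)) : Prop :=
  ∀ i : Fin nums.length, i.val < nums[i].length ∧ nums.length - 1 - i.val < nums[i].length
instance (nums : List (List Int)) : Decidable (Pre_diagonalPrime nums) := by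
  unfold Pre_diagonalPrime; infer_instance
def pvWitness_diagonalPrime : List (List Int) := [[1, 2, 3], [5, 17, 7], [9, 11, 10]]
def Spec_diagonalPrime (nums : List (List Int)) (out : Int) : Prop := out = diagonalPrime_alt nums
instance (nums : List (List Int)) (out : Int) : Decidable (Spec_diagonalPrime nums out) := by unfold Spec_diagonalPrime; infer_instance

-- ===== CLAIM (what is proved, stated in full; the proofs are below) =====
def Claim_equal_diagonalPrime : Prop := ∀ (nums : List (List Int)), Dom_diagonalPrime nums → Pre_diagonalPrime nums → Spec_diagonalPrime nums (diagonalPrime nums)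

-- ===== LEMMAS AND PROOFS =====

-- the max-if-prime step, the shape both folds reduce to
def stepM (m v : Int) : Int := if isPrime v then max m v else m

lemma stepA_eq_stepM (m v : Int) :
    (if m < v ∧ isPrime v = true then v else m) = stepM m v := by
  unfold stepM
  by_cases hp : isPrime v = true <;> simp [hp] <;> omega

lemma isPrime_two_le {x : Int} (h : isPrime x = true) : 2 ≤ x := by
  unfold isPrime at h
  by_contra hx
  simp [show x < 2 by omega] at h

lemma foldl_two_eq_flatMap (f : Int → Int → Int) (a b : Int → Int) :
    ∀ (xs : List Int) (init : Int),
      xs.foldl (fun m i => f (f m (a i)) (b i)) init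
        = (xs.flatMap (fun i => [a i, b i])).foldl f init := by
  intro xs
  induction xs with
  | nil => intro init; rfl
  | cons x t ih => intro init; simp [List.foldl, ih]

lemma foldl_append_eq_flatMap' (g : Int → List Int) :
    ∀ (xs : List Int) (acc : List Int),
      xs.foldl (fun vs i => vs ++ g i) acc = acc ++ xs.flatMap g := by
  intro xs
  induction xs with
  | nil => intro acc; simp
  | cons x t ih => intro acc; simp [List.foldl, ih]

lemma stepM_swap (m a b : Int) : stepM (stepM m a) b = stepM (stepM m b) a := by
  unfold stepM
  split_ifs <;> simp [max_right_comm]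

lemma foldl_stepM_perm {l₁ l₂ : List Int} (p : l₁.Perm l₂) :
    ∀ m, l₁.foldl stepM m = l₂.foldl stepM m := by
  induction p with
  | nil => intro m; rfl
  | cons x _ ih => intro m; simp [List.foldl, ih]
  | swap x y l => intro m; simp [List.foldl, stepM_swap]
  | trans _ _ ih₁ ih₂ => intro m; rw [ih₁, ih₂]

lemma foldl_stepM_of_le : ∀ (t : List Int) (m : Int), (∀ y ∈ t, y ≤ m) → t.foldl stepM m = m := by
  intro t
  induction t with
  | nil => intro m _; rfl
  | cons h t ih =>
    intro m hle
    have hh : h ≤ m := hle h (by simp)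
    have hstep : stepM m h = m := by
      unfold stepM; split_ifs <;> omega
    simp only [List.foldl, hstep]
    exact ih m (fun y hy => hle y (by simp [hy]))

lemma foldl_stepM_sorted : ∀ (s : List Int), s.Pairwise (fun a b => b ≤ a) →
    s.foldl stepM 0 = (s.find? isPrime).getD 0 := by
  intro s
  induction s with
  | nil => intro _; rfl
  | cons h t ih =>
    intro hp
    rw [List.pairwise_cons] at hp
    by_cases hph : isPrime h = true
    · have h2 : (2 : Int) ≤ h := isPrime_two_le hph
      have hstep : stepM 0 h = h := by unfold stepM; rw [if_pos hph]; omega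
      simp only [List.foldl, hstep, List.find?_cons_of_pos hph]
      exact foldl_stepM_of_le t h hp.1
    · have hstep : stepM 0 h = 0 := by unfold stepM; simp [hph]
      simp only [List.foldl, hstep, List.find?_cons_of_neg hph]
      exact ih hp.2

-- ===== VERDICT (by name: the statement is the Claim_ definition above) =====
theorem diagonalPrime_spec : Claim_equal_diagonalPrime := by
  intro nums _ _
  unfold Spec_diagonalPrime diagonalPrime diagonalPrime_alt
  set n : Int := (nums.length : Int) with hn
  set a : Int → Int := fun i => PySem.List.pyGetD (PySem.List.pyGetD nums i []) i 0 with ha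
  set b : Int → Int := fun i => PySem.List.pyGetD (PySem.List.pyGetD nums i []) (n - i - 1) 0 with hb
  set L : List Int := (PySem.List.pyRange 0 n 1).flatMap (fun i => [a i, b i]) with hL
  have hA : (PySem.List.pyRange 0 n 1).foldl
      (fun m i => stepM (stepM m (a i)) (b i)) 0 = L.foldl stepM 0 :=
    foldl_two_eq_flatMap stepM a b _ 0
  have hB : (PySem.List.pyRange 0 n 1).foldl
      (fun vs i => vs ++ [a i, b i]) [] = L := by
    rw [foldl_append_eq_flatMap']; rfl
  simp only [stepA_eq_stepM]
  rw [hA, hB]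
  have hperm : (PySem.List.sorted L (fun v => v) true).Perm L := PySem.List.sorted_perm L _ true
  rw [foldl_stepM_perm hperm.symm 0,
      foldl_stepM_sorted _ (PySem.List.sorted_pairwise_rev L (fun v => v))]
  cases (PySem.List.sorted L (fun v => v) true).find? isPrime <;> rfl
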